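-- pv_equiv track=rewrite | github.com/alisidd/Vector-Clock | custom_process.py | compare_vectors
-- ===== SOURCE A (Python) =====
-- def compare_vectors(v1, v2):
--     gt_diff, lt_diff = 0, 0
--     for (value1, value2) in zip(v1, v2):
--         gt_diff |= value1 > value2
--         lt_diff |= value1 < value2
--         if gt_diff and lt_diff:
--             break
--     return int(gt_diff) - int(lt_diff)
-- ===== SOURCE B (Python) =====
-- def compare_vectors(v1, v2):
--     gt = any(a > b for a, b in zip(v1, v2))
--     lt = any(a < b for a, b in zip(v1, v2))
--     return int(gt) - int(lt)
-- ===== Notes on version B (the rewrite author's own statement) =====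
-- stated objective: simpler
-- what changed: Replaces the single stateful loop with accumulated flags and a combined early-break by two independent short-circuiting any-scans over the zipped pair, returning int(gt) - int(lt).
import Mathlib
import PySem

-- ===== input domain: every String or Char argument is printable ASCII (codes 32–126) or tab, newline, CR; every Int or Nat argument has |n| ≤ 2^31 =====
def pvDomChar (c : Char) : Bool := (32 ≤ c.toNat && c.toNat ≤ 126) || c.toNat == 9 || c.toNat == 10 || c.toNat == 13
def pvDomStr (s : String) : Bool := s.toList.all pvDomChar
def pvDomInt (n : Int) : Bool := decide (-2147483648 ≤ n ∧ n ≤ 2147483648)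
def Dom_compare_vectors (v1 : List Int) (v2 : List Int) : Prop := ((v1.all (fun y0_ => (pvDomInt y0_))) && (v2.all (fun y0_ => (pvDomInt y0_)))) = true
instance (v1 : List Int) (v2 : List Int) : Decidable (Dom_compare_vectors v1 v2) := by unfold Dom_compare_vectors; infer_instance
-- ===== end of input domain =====

-- B replaces A's single stateful loop (flags + combined early break) by two
-- independent short-circuiting existential scans; objective: simpler.

-- ===== PORT A =====
-- A's for-loop over zip(v1,v2) with flags gt_diff/lt_diff and a break once both hold.
def cvLoopA : List (Int × Int) → Bool → Bool → Int
  | [], gt, lt => (if gt then 1 else 0) - (if lt then 1 else 0)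
  | (a, b) :: rest, gt, lt =>
    let gt' := gt || decide (a > b)
    let lt' := lt || decide (a < b)
    if gt' && lt' then (if gt' then (1 : Int) else 0) - (if lt' then 1 else 0)
    else cvLoopA rest gt' lt'

def compare_vectors (v1 : List Int) (v2 : List Int) : Int :=
  cvLoopA (v1.zip v2) false false

-- ===== PORT B =====
def compare_vectors_alt (v1 : List Int) (v2 : List Int) : Int :=
  (if (v1.zip v2).any (fun p => decide (p.1 > p.2)) then 1 else 0) -
  (if (v1.zip v2).any (fun p => decide (p.1 < p.2)) then 1 else 0)

-- ===== PRECONDITION & SPEC =====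
def Spec_compare_vectors (v1 : List Int) (v2 : List Int) (out : Int) : Prop := out = compare_vectors_alt v1 v2
instance (v1 : List Int) (v2 : List Int) (out : Int) : Decidable (Spec_compare_vectors v1 v2 out) := by unfold Spec_compare_vectors; infer_instance

-- ===== CLAIM (what is proved, stated in full; the proofs are below) =====
def Claim_equal_compare_vectors : Prop := ∀ (v1 : List Int) (v2 : List Int), Dom_compare_vectors v1 v2 → Spec_compare_vectors v1 v2 (compare_vectors v1 v2)

-- ===== LEMMAS AND PROOFS =====
theorem cvLoopA_eq (l : List (Int × Int)) : ∀ gt lt : Bool,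
    cvLoopA l gt lt =
      (if gt || l.any (fun p => decide (p.1 > p.2)) then 1 else 0) -
      (if lt || l.any (fun p => decide (p.1 < p.2)) then 1 else 0) := by
  induction l with
  | nil => intro gt lt; simp [cvLoopA]
  | cons hd tl ih =>
    intro gt lt
    obtain ⟨a, b⟩ := hd
    simp only [cvLoopA, List.any_cons, ← Bool.or_assoc]
    by_cases h : ((gt || decide (a > b)) && (lt || decide (a < b))) = true
    · obtain ⟨h1, h2⟩ := Bool.and_eq_true_iff.mp h
      simp [h1, h2]
    · rw [if_neg h, ih]

-- ===== VERDICT (by name: the statement is the Claim_ definition above) =====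
theorem compare_vectors_spec : Claim_equal_compare_vectors := by
  intro v1 v2 _
  unfold Spec_compare_vectors compare_vectors compare_vectors_alt
  rw [cvLoopA_eq]
  simp only [Bool.false_or]
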